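-- pv_equiv track=rewrite | github.com/ChristianSBP/sbp-services | src/dienstplan/excel_parser/event_extractor.py | _detect_ort
-- ===== SOURCE A (Python) =====
-- from typing import List, Optional, Tuple, Set
--
-- def _detect_ort(text: str, bekannte_orte: List[str],
--                 venue_addresses: dict = None) -> str:
--     """Erkennt den Aufführungsort und reichert mit Adresse an."""
--     if venue_addresses is None:
--         venue_addresses = {}
--
--     for ort in sorted(bekannte_orte, key=len, reverse=True):
--         if ort.lower() in text.lower():
--             return venue_addresses.get(ort, ort)
--     return ""
-- ===== SOURCE B (Python) =====
-- def _detect_ort(text, bekannte_orte, venue_addresses=None):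
--     """Erkennt den Aufführungsort und reichert mit Adresse an."""
--     text_lower = text.lower()
--     best = None
--     for ort in bekannte_orte:
--         if (best is None or len(ort) > len(best)) and ort.lower() in text_lower:
--             best = ort
--     if best is None:
--         return ""
--     if venue_addresses is None:
--         return best
--     return venue_addresses.get(best, best)
-- ===== Notes on version B (the rewrite author's own statement) =====
-- stated objective: simpler
-- what changed: Replaced sort-by-length-then-scan-for-first-match with a single linear pass keeping the longest matching place so far (length checked first, strict > preserving the stable sort's earliest-listed tie-break), lowercasing the text once instead of on every iteration.
import Mathlib
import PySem

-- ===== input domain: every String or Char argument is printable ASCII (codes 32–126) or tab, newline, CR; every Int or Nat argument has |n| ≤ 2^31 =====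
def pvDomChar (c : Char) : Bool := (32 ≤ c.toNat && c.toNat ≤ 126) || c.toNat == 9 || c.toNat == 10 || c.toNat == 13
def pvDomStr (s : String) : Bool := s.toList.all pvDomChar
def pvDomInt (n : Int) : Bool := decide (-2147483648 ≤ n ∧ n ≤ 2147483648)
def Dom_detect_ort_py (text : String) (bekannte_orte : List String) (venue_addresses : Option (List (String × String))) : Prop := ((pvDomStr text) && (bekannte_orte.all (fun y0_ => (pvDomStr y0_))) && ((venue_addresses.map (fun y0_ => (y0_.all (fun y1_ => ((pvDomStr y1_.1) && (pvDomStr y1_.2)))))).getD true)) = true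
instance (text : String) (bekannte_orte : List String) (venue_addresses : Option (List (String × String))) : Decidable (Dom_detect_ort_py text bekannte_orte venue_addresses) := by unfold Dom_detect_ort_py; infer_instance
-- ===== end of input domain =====

-- B replaces A's sort-by-length-then-first-match scan by a single linear pass that keeps the
-- longest matching place seen so far (strict > keeps the stable sort's earliest-listed tie-break): simpler.


-- ===== PORT A =====
-- 'for ort in sorted(…): if …: return …' is ported as find? over the sorted list;
-- dict.get(ort, ort) is PySem.Dict.getD (venue_addresses is None -> the empty dict).
def detect_ort_py (text : String) (bekannte_orte : List String) (venue_addresses : Option (List (String × String))) : String :=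
  let va : PySem.Dict String String := PySem.Dict.mk (venue_addresses.getD [])
  match (PySem.List.sorted bekannte_orte (fun o => PySem.Str.len o) true).find?
      (fun ort => PySem.Str.isIn (PySem.Str.lower ort) (PySem.Str.lower text)) with
  | some ort => PySem.Dict.getD va ort ort
  | none => ""

-- ===== PORT B =====
def detect_ort_py_alt (text : String) (bekannte_orte : List String) (venue_addresses : Option (List (String × String))) : String :=
  let text_lower := PySem.Str.lower text
  let best := bekannte_orte.foldl (fun b ort =>
    if (match b with
        | none => true
        | some bb => decide (PySem.Str.len bb < PySem.Str.len ort)) &&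
       PySem.Str.isIn (PySem.Str.lower ort) text_lower
    then some ort else b) (none : Option String)
  match best with
  | none => ""
  | some b =>
    match venue_addresses with
    | none => b
    | some d => PySem.Dict.getD (PySem.Dict.mk d) b b

-- ===== PRECONDITION & SPEC =====
def Spec_detect_ort_py (text : String) (bekannte_orte : List String) (venue_addresses : Option (List (String × String))) (out : String) : Prop := out = detect_ort_py_alt text bekannte_orte venue_addresses
instance (text : String) (bekannte_orte : List String) (venue_addresses : Option (List (String × String))) (out : String) : Decidable (Spec_detect_ort_py text bekannte_orte venue_addresses out) := by unfold Spec_detect_ort_py; infer_instance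

-- ===== CLAIM (what is proved, stated in full; the proofs are below) =====
def Claim_equal_detect_ort_py : Prop := ∀ (text : String) (bekannte_orte : List String) (venue_addresses : Option (List (String × String))), Dom_detect_ort_py text bekannte_orte venue_addresses → Spec_detect_ort_py text bekannte_orte venue_addresses (detect_ort_py text bekannte_orte venue_addresses)

-- ===== LEMMAS AND PROOFS =====

-- B's loop step: take x when it matches and is strictly longer than the best so far.
def pvStep {α : Type} (key : α → Int) (P : α → Bool) (b : Option α) (x : α) : Option α :=
  if (match b with
      | none => true
      | some bb => decide (key bb < key x)) && P x
  then some x else b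

-- insertBy for the descending sort keeps the accumulator pairwise key-descending.
theorem pvInsPairwise {α : Type} (key : α → Int) (x : α) (acc : List α)
    (h : acc.Pairwise (fun a b => key b ≤ key a)) :
    (PySem.List.insertBy (fun a b => decide (key b < key a)) x acc).Pairwise
      (fun a b => key b ≤ key a) := by
  induction acc with
  | nil => simp [PySem.List.insertBy]
  | cons y ys ih =>
    rw [List.pairwise_cons] at h
    simp only [PySem.List.insertBy]
    split_ifs with hxy
    · simp only [decide_eq_true_eq] at hxy
      refine List.Pairwise.cons ?_ (List.Pairwise.cons h.1 h.2)
      intro z hz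
      rcases List.mem_cons.mp hz with rfl | hz
      · omega
      · have := h.1 z hz; omega
    · simp only [decide_eq_true_eq, not_lt] at hxy
      refine List.Pairwise.cons ?_ (ih h.2)
      intro z hz
      rcases (PySem.List.mem_insertBy _ _ _ _).mp hz with rfl | hz
      · exact hxy
      · exact h.1 z hz

-- On a key-descending accumulator, the first P-match after inserting x is exactly B's step.
theorem pvFindIns {α : Type} (key : α → Int) (P : α → Bool) (x : α) (acc : List α)
    (h : acc.Pairwise (fun a b => key b ≤ key a)) :
    (PySem.List.insertBy (fun a b => decide (key b < key a)) x acc).find? P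
      = pvStep key P (acc.find? P) x := by
  induction acc with
  | nil =>
    simp only [PySem.List.insertBy, List.find?_nil, pvStep, Bool.true_and]
    by_cases hp : P x <;> simp [List.find?, hp]
  | cons y ys ih =>
    rw [List.pairwise_cons] at h
    simp only [PySem.List.insertBy]
    split_ifs with hxy
    · simp only [decide_eq_true_eq] at hxy
      by_cases hp : P x
      · rw [List.find?_cons_of_pos hp]
        rcases hfy : (y :: ys).find? P with _ | bb
        · simp [pvStep, hp]
        · have hbbmem : bb ∈ y :: ys := List.mem_of_find?_eq_some hfy
          have hle : key bb ≤ key y := by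
            rcases List.mem_cons.mp hbbmem with rfl | hbb
            · omega
            · exact h.1 bb hbb
          have hlt : key bb < key x := by omega
          simp [pvStep, hp, hlt]
      · rw [List.find?_cons_of_neg hp]
        simp [pvStep, hp]
    · simp only [decide_eq_true_eq, not_lt] at hxy
      by_cases hpy : P y
      · rw [List.find?_cons_of_pos hpy, List.find?_cons_of_pos hpy]
        have hnlt : ¬ key y < key x := by omega
        simp [pvStep, hnlt]
      · rw [List.find?_cons_of_neg hpy, List.find?_cons_of_neg hpy]
        exact ih h.2

-- Folding insertBy over xs and taking the first P-match is B's fold.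
theorem pvFindFoldl {α : Type} (key : α → Int) (P : α → Bool) (xs : List α) (acc : List α)
    (h : acc.Pairwise (fun a b => key b ≤ key a)) :
    (xs.foldl (fun acc x => PySem.List.insertBy (fun a b => decide (key b < key a)) x acc) acc).find? P
      = xs.foldl (pvStep key P) (acc.find? P) := by
  induction xs generalizing acc with
  | nil => rfl
  | cons x xs ih =>
    simp only [List.foldl_cons]
    rw [ih _ (pvInsPairwise key x acc h), pvFindIns key P x acc h]

-- The first match in the stable length-descending sort is B's longest-so-far fold.
theorem pvFindSorted {α : Type} (key : α → Int) (P : α → Bool) (xs : List α) :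
    (PySem.List.sorted xs key true).find? P = xs.foldl (pvStep key P) none := by
  rw [PySem.List.sorted_rev_eq_foldl_insertBy]
  exact pvFindFoldl key P xs [] (List.Pairwise.nil)

-- ===== VERDICT (by name: the statement is the Claim_ definition above) =====
set_option maxHeartbeats 1000000 in
theorem detect_ort_py_spec : Claim_equal_detect_ort_py := by
  intro text bekannte_orte venue_addresses _
  simp only [Spec_detect_ort_py, detect_ort_py, detect_ort_py_alt]
  have hstep : (fun (b : Option String) (ort : String) =>
      if (match b with
          | none => true
          | some bb => decide (PySem.Str.len bb < PySem.Str.len ort)) &&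
         PySem.Str.isIn (PySem.Str.lower ort) (PySem.Str.lower text)
      then some ort else b)
      = pvStep (fun o => PySem.Str.len o)
          (fun ort => PySem.Str.isIn (PySem.Str.lower ort) (PySem.Str.lower text)) := by
    funext b ort; cases b <;> rfl
  rw [hstep, pvFindSorted (fun o => PySem.Str.len o)
      (fun ort => PySem.Str.isIn (PySem.Str.lower ort) (PySem.Str.lower text)) bekannte_orte]
  generalize List.foldl (pvStep (fun o => PySem.Str.len o)
      (fun ort => PySem.Str.isIn (PySem.Str.lower ort) (PySem.Str.lower text))) none
      bekannte_orte = r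
  cases r with
  | none => rfl
  | some b =>
    cases venue_addresses with
    | none => rfl
    | some d => rfl
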